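-- pv_equiv track=rewrite | github.com/Percona-Lab/mergai | src/mergai/git_utils.py | get_conflict_type
-- ===== SOURCE A (Python) =====
-- from enum import StrEnum
--
-- class ConflictType(StrEnum):
--     BOTH_MODIFIED = "both modified"
--     BOTH_ADDED = "both added"
--     DELETED_BY_THEM = "deleted by them"
--     ADDED_BY_US = "added by us"
--     DELETED_BY_US = "deleted by us"
--     ADDED_BY_THEM = "added by them"
--     UNKNOWN = "unknown"
--
-- def get_conflict_type(stages: list) -> ConflictType:
--     stage_numbers = {stage for stage, _ in stages}
--
--     has_base = 1 in stage_numbers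
--     has_ours = 2 in stage_numbers
--     has_theirs = 3 in stage_numbers
--
--     if has_ours and has_theirs:
--         if has_base:
--             return ConflictType.BOTH_MODIFIED
--         else:
--             return ConflictType.BOTH_ADDED
--     elif has_ours and not has_theirs:
--         if has_base:
--             return ConflictType.DELETED_BY_THEM
--         else:
--             return ConflictType.ADDED_BY_US
--     elif has_theirs and not has_ours:
--         if has_base:
--             return ConflictType.DELETED_BY_US
--         else:
--             return ConflictType.ADDED_BY_THEM
--     else:
--         return ConflictType.UNKNOWN
-- ===== SOURCE B (Python) =====
-- from enum import StrEnum
--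
-- class ConflictType(StrEnum):
--     BOTH_MODIFIED = "both modified"
--     BOTH_ADDED = "both added"
--     DELETED_BY_THEM = "deleted by them"
--     ADDED_BY_US = "added by us"
--     DELETED_BY_US = "deleted by us"
--     ADDED_BY_THEM = "added by them"
--     UNKNOWN = "unknown"
--
-- # index = bitmask: bit0 = stage 1 (base), bit1 = stage 2 (ours), bit2 = stage 3 (theirs)
-- _BY_MASK = [
--     ConflictType.UNKNOWN,          # 0b000: nothing
--     ConflictType.UNKNOWN,          # 0b001: base only
--     ConflictType.ADDED_BY_US,      # 0b010: ours
--     ConflictType.DELETED_BY_THEM,  # 0b011: ours + base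
--     ConflictType.ADDED_BY_THEM,    # 0b100: theirs
--     ConflictType.DELETED_BY_US,    # 0b101: theirs + base
--     ConflictType.BOTH_ADDED,       # 0b110: ours + theirs
--     ConflictType.BOTH_MODIFIED,    # 0b111: all three
-- ]
--
-- def get_conflict_type(stages: list) -> ConflictType:
--     mask = 0
--     for stage, _ in stages:
--         if 1 <= stage <= 3:
--             mask |= 1 << (stage - 1)
--     return _BY_MASK[mask]
-- ===== Notes on version B (the rewrite author's own statement) =====
-- stated objective: alternative
-- what changed: Replaces the set of stage numbers plus three membership tests and a nested if/else tree by a single fold that ORs each stage into a 3-bit mask, then indexes an 8-entry array by the mask.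
import Mathlib
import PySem

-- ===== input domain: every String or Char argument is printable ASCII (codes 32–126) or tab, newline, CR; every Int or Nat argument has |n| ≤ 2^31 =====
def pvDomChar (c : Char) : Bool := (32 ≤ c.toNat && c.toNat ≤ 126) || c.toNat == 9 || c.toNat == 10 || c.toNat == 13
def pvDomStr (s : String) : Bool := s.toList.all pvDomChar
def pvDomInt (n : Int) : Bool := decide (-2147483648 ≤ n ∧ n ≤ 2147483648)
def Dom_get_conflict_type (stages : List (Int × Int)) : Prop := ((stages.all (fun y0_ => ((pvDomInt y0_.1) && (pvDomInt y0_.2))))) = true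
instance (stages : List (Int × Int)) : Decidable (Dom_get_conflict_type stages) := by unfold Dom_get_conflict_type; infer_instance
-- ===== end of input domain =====

-- B replaces A's set-of-stages + three membership tests + nested if/else tree
-- by one fold ORing each stage into a 3-bit mask indexing an 8-entry table; objective: alternative.

-- ===== PORT A =====
def get_conflict_type (stages : List (Int × Int)) : String :=
  let stage_numbers : PySem.Set Int := PySem.Set.ofList (stages.map (fun p => p.1))
  let has_base := PySem.Set.contains stage_numbers 1
  let has_ours := PySem.Set.contains stage_numbers 2
  let has_theirs := PySem.Set.contains stage_numbers 3
  if has_ours && has_theirs then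
    if has_base then "both modified" else "both added"
  else if has_ours && !has_theirs then
    if has_base then "deleted by them" else "added by us"
  else if has_theirs && !has_ours then
    if has_base then "deleted by us" else "added by them"
  else
    "unknown"

-- ===== PORT B =====
-- _BY_MASK of Source B: index = bitmask, bit0 = stage 1, bit1 = stage 2, bit2 = stage 3
def byMask : List String :=
  ["unknown", "unknown", "added by us", "deleted by them",
   "added by them", "deleted by us", "both added", "both modified"]

-- one step of Source B's loop: mask |= 1 << (stage - 1) for stages 1..3
def maskStep (m : Nat) (p : Int × Int) : Nat :=
  if 1 ≤ p.1 ∧ p.1 ≤ 3 then m ||| (1 <<< (p.1 - 1).toNat) else m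

def get_conflict_type_alt (stages : List (Int × Int)) : String :=
  let mask := stages.foldl maskStep 0
  -- mask < 8 always, so the Python index never raises; getD is exact here
  byMask.getD mask "unknown"

-- ===== PRECONDITION & SPEC =====
def Spec_get_conflict_type (stages : List (Int × Int)) (out : String) : Prop := out = get_conflict_type_alt stages
instance (stages : List (Int × Int)) (out : String) : Decidable (Spec_get_conflict_type stages out) := by unfold Spec_get_conflict_type; infer_instance

-- ===== CLAIM (what is proved, stated in full; the proofs are below) =====
def Claim_equal_get_conflict_type : Prop := ∀ (stages : List (Int × Int)), Dom_get_conflict_type stages → Spec_get_conflict_type stages (get_conflict_type stages)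

-- ===== LEMMAS AND PROOFS =====
def contrib (p : Int × Int) : Nat :=
  if 1 ≤ p.1 ∧ p.1 ≤ 3 then 1 <<< (p.1 - 1).toNat else 0

def maskOf (l : List (Int × Int)) : Nat :=
  (if (1 : Int) ∈ l.map Prod.fst then 1 else 0) |||
  (if (2 : Int) ∈ l.map Prod.fst then 2 else 0) |||
  (if (3 : Int) ∈ l.map Prod.fst then 4 else 0)

theorem maskStep_eq (m : Nat) (p : Int × Int) : maskStep m p = m ||| contrib p := by
  unfold maskStep contrib
  split_ifs <;> simp

theorem contrib_cons (p : Int × Int) (l : List (Int × Int)) :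
    contrib p ||| maskOf l = maskOf (p :: l) := by
  have trich : p.1 = 1 ∨ p.1 = 2 ∨ p.1 = 3 ∨
      (¬ ((1 : Int) ≤ p.1 ∧ p.1 ≤ 3) ∧ (1 : Int) ≠ p.1 ∧ (2 : Int) ≠ p.1 ∧ (3 : Int) ≠ p.1) := by
    omega
  obtain h | h | h | ⟨hc, n1, n2, n3⟩ := trich
  · by_cases m1 : (1 : Int) ∈ l.map Prod.fst <;>
    by_cases m2 : (2 : Int) ∈ l.map Prod.fst <;>
    by_cases m3 : (3 : Int) ∈ l.map Prod.fst <;>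
    simp [contrib, maskOf, h, m1, m2, m3]
  · by_cases m1 : (1 : Int) ∈ l.map Prod.fst <;>
    by_cases m2 : (2 : Int) ∈ l.map Prod.fst <;>
    by_cases m3 : (3 : Int) ∈ l.map Prod.fst <;>
    simp [contrib, maskOf, h, m1, m2, m3]
  · by_cases m1 : (1 : Int) ∈ l.map Prod.fst <;>
    by_cases m2 : (2 : Int) ∈ l.map Prod.fst <;>
    by_cases m3 : (3 : Int) ∈ l.map Prod.fst <;>
    simp [contrib, maskOf, h, m1, m2, m3]
  · show contrib p ||| maskOf l = maskOf (p :: l)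
    unfold maskOf
    rw [List.map_cons,
        if_congr (List.mem_cons.trans (or_iff_right n1)) rfl rfl,
        if_congr (List.mem_cons.trans (or_iff_right n2)) rfl rfl,
        if_congr (List.mem_cons.trans (or_iff_right n3)) rfl rfl]
    simp [contrib, hc]

theorem foldl_maskStep (l : List (Int × Int)) : ∀ m : Nat, l.foldl maskStep m = m ||| maskOf l := by
  induction l with
  | nil => intro m; simp [maskOf]
  | cons p l ih =>
    intro m
    rw [List.foldl_cons, ih, maskStep_eq, Nat.or_assoc, contrib_cons]

-- ===== VERDICT (by name: the statement is the Claim_ definition above) =====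
theorem get_conflict_type_spec : Claim_equal_get_conflict_type := by
  intro stages _
  unfold Spec_get_conflict_type get_conflict_type get_conflict_type_alt
  rw [foldl_maskStep]
  by_cases m1 : (1 : Int) ∈ stages.map Prod.fst <;>
  by_cases m2 : (2 : Int) ∈ stages.map Prod.fst <;>
  by_cases m3 : (3 : Int) ∈ stages.map Prod.fst <;>
    simp [maskOf, byMask, PySem.Set.contains, PySem.Set.mem_ofList, m1, m2, m3]
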